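-- pv_equiv track=rewrite | github.com/RiceCakeInJar/SICP | lab01/fr.py | fr
-- ===== SOURCE A (Python) =====
-- def fr(x):
--     """Return the min digit of x.
--
--     >>> min_digit(10)
--     0
--     >>> min_digit(4224)
--     2
--     >>> min_digit(1234567890)
--     0
--     >>> # make sure that you are using return rather than print
--     >>> a = min_digit(123)
--     >>> a
--     1
--     """
--     x = str(x)
--     i = 0
--     r = x.count(str(i))
--     ans = 0
--     while r==0:
--         i = i + 1
--         r = x.count(str(i))
--         ans = ans + 1
--     return ans
-- ===== SOURCE B (Python) =====
-- def fr(x):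
--     return min(int(c) for c in str(x) if c.isdigit())
-- ===== Notes on version B (the rewrite author's own statement) =====
-- stated objective: simpler
-- what changed: B takes a single running-min pass over the characters of str(x) (filtering out non-digits), instead of A's loop that rescans the whole string with count() once per candidate digit value in increasing order.
import Mathlib
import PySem

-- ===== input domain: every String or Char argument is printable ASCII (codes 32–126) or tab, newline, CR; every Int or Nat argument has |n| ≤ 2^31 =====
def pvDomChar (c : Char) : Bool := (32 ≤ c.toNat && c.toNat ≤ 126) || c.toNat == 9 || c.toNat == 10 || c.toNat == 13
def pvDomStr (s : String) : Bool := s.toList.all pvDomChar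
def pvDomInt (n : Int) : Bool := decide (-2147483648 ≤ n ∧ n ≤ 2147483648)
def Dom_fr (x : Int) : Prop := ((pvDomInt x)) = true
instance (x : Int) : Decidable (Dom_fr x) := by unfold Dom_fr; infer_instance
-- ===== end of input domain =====

-- B replaces A's rescan-per-candidate-digit loop by one running-min pass over the characters of str(x); objective: simpler.


-- ===== PORT A =====
-- the 'while r == 0' loop; fuel only makes the recursion total — 10 steps always suffice
-- since str(x) of an integer contains a digit 0..9 (proved below), so the port is exact.
def frWhile (s : List Char) (i : Int) (r : Nat) (ans : Int) : Nat → Int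
  | 0 => ans
  | fuel + 1 =>
    if r = 0 then
      let i' := i + 1
      let r' := PySem.Chars.count s (PySem.Int.toChars i')
      let ans' := ans + 1
      frWhile s i' r' ans' fuel
    else ans

def fr (x : Int) : Int :=
  let s := PySem.Int.toChars x       -- x = str(x)
  let i : Int := 0
  let r := PySem.Chars.count s (PySem.Int.toChars i)   -- r = x.count(str(i))
  let ans : Int := 0
  frWhile s i r ans 10

-- ===== PORT B =====
-- min(int(c) for c in str(x) if c.isdigit()); int(c) on a digit char c is c.toNat - 48 (exact
-- after the isdigit filter). The [] branch is Python's min-of-empty ValueError; it is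
-- unreachable because str of an integer always contains a digit.
def fr_alt (x : Int) : Int :=
  match ((PySem.Int.toChars x).filter PySem.Chars.isdigit).map
      (fun c => (c.toNat : Int) - 48) with
  | [] => 0
  | h :: t => t.foldl min h

-- ===== PRECONDITION & SPEC =====
def Spec_fr (x : Int) (out : Int) : Prop := out = fr_alt x
instance (x : Int) (out : Int) : Decidable (Spec_fr x out) := by unfold Spec_fr; infer_instance

-- ===== CLAIM (what is proved, stated in full; the proofs are below) =====
def Claim_equal_fr : Prop := ∀ (x : Int), Dom_fr x → Spec_fr x (fr x)

-- ===== LEMMAS AND PROOFS =====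

-- the char for digit value j
def digitOf (j : Nat) : Char := Char.ofNat (48 + j)

-- substring count of a single character is the element count
lemma count_go_singleton (c : Char) :
    ∀ (l : List Char) (fuel acc : Nat), l.length ≤ fuel →
      PySem.Chars.count.go [c] fuel l acc = acc + l.count c := by
  intro l
  induction l with
  | nil => intro fuel acc _; cases fuel <;> simp [PySem.Chars.count.go]
  | cons h t ih =>
    intro fuel acc hle
    cases fuel with
    | zero => simp at hle
    | succ f =>
      simp only [PySem.Chars.count.go]
      by_cases hc : c = h
      · subst hc
        simp only [List.isPrefixOf, BEq.rfl, Bool.true_and]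
        rw [if_pos (by simp)]
        simp only [List.length_nil, List.length_cons, Nat.zero_add, List.drop_succ_cons,
          List.drop_zero]
        rw [ih f (acc + 1) (by simp only [List.length_cons] at hle; omega)]
        simp
        omega
      · have hpf : ([c].isPrefixOf (h :: t)) = false := by
          simp only [List.isPrefixOf, Bool.and_eq_false_iff]
          left
          exact beq_eq_false_iff_ne.mpr hc
        rw [hpf]
        simp only [Bool.false_eq_true, if_false]
        rw [ih f acc (by simp only [List.length_cons] at hle; omega)]
        simp [Ne.symm hc]

lemma count_singleton (s : List Char) (c : Char) :
    PySem.Chars.count s [c] = s.count c := by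
  have h := count_go_singleton c s s.length 0 le_rfl
  simp only [PySem.Chars.count, List.isEmpty_cons, Bool.false_eq_true, if_false]
  omega

-- str(j) for a single digit value j ≤ 9
lemma toChars_digit (j : Nat) (hj : j ≤ 9) :
    PySem.Int.toChars (j : Int) = [digitOf j] := by
  interval_cases j <;> decide

lemma isdigit_digitOf (j : Nat) (hj : j ≤ 9) : PySem.Chars.isdigit (digitOf j) = true := by
  interval_cases j <;> decide

lemma digitOf_toNat (j : Nat) (hj : j ≤ 9) : (digitOf j).toNat = 48 + j := by
  interval_cases j <;> decide

-- a digit char is digitOf of its value, and that value is ≤ 9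
lemma isdigit_elim {c : Char} (h : PySem.Chars.isdigit c = true) :
    c = digitOf (c.toNat - 48) ∧ c.toNat - 48 ≤ 9 ∧ 48 ≤ c.toNat := by
  simp only [PySem.Chars.isdigit, Bool.and_eq_true, decide_eq_true_eq] at h
  obtain ⟨h1, h2⟩ := h
  have h1' : 48 ≤ c.toNat := by simpa [Char.le_def, UInt32.le_iff_toNat_le] using h1
  have h2' : c.toNat ≤ 57 := by simpa [Char.le_def, UInt32.le_iff_toNat_le] using h2
  refine ⟨?_, by omega, h1'⟩
  have he : 48 + (c.toNat - 48) = c.toNat := by omega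
  rw [digitOf, he, Char.ofNat_toNat]

-- every char that Nat.toDigitsCore prepends stays in the result
lemma mem_toDigitsCore (b : Nat) :
    ∀ (fuel n : Nat) (ds : List Char) (c : Char), c ∈ ds → c ∈ Nat.toDigitsCore b fuel n ds := by
  intro fuel
  induction fuel with
  | zero => intro n ds c h; simpa [Nat.toDigitsCore] using h
  | succ f ih =>
    intro n ds c h
    simp only [Nat.toDigitsCore]
    split
    · exact List.mem_cons_of_mem _ h
    · exact ih _ _ _ (List.mem_cons_of_mem _ h)

lemma digitChar_isdigit (d : Nat) (hd : d < 10) : PySem.Chars.isdigit d.digitChar = true := by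
  interval_cases d <;> decide

lemma toDigitsCore_has_digit :
    ∀ (fuel n : Nat) (ds : List Char),
      ∃ c ∈ Nat.toDigitsCore 10 (fuel + 1) n ds, PySem.Chars.isdigit c = true := by
  intro fuel n ds
  simp only [Nat.toDigitsCore]
  split
  · exact ⟨(n % 10).digitChar, List.mem_cons_self, digitChar_isdigit _ (Nat.mod_lt _ (by omega))⟩
  · cases fuel with
    | zero =>
      exact ⟨(n % 10).digitChar,
        by simp [Nat.toDigitsCore],
        digitChar_isdigit _ (Nat.mod_lt _ (by omega))⟩
    | succ f =>
      exact ⟨(n % 10).digitChar,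
        mem_toDigitsCore 10 (f + 1) _ _ _ List.mem_cons_self,
        digitChar_isdigit _ (Nat.mod_lt _ (by omega))⟩

lemma toChars_has_digit (x : Int) :
    ∃ c ∈ PySem.Int.toChars x, PySem.Chars.isdigit c = true := by
  simp only [PySem.Int.toChars]
  split
  · obtain ⟨c, hc, hd⟩ := toDigitsCore_has_digit x.natAbs x.natAbs []
    exact ⟨c, List.mem_cons_of_mem _ hc, hd⟩
  · exact toDigitsCore_has_digit x.toNat x.toNat []

-- A's loop returns the least digit value present in s
lemma frWhile_eq (s : List Char) (hex : ∃ j, digitOf j ∈ s) :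
    ∀ (fuel j : Nat), (∀ i < j, digitOf i ∉ s) → Nat.find hex < j + fuel → j + fuel ≤ 10 →
      frWhile s (j : Int) (PySem.Chars.count s (PySem.Int.toChars (j : Int))) (j : Int) fuel
        = (Nat.find hex : Int) := by
  intro fuel
  induction fuel with
  | zero => intro j hlt h1 _; exact absurd (Nat.find_spec hex) (hlt _ (by omega))
  | succ f ih =>
    intro j hlt hfind hbound
    have hj9 : j ≤ 9 := by omega
    rw [toChars_digit j hj9, count_singleton]
    simp only [frWhile]
    by_cases hz : s.count (digitOf j) = 0
    · rw [if_pos hz]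
      have hnotmem : digitOf j ∉ s := List.count_eq_zero.mp hz
      have hlt' : ∀ i < j + 1, digitOf i ∉ s := by
        intro i hi
        rcases Nat.lt_succ_iff_lt_or_eq.mp hi with h | h
        · exact hlt i h
        · subst h; exact hnotmem
      have hfind' : j < Nat.find hex := by
        rcases Nat.lt_or_ge j (Nat.find hex) with h | h
        · exact h
        · exact absurd (Nat.find_spec hex) (hlt' _ (by omega))
      rw [show ((j : Int) + 1) = (((j + 1 : Nat)) : Int) by push_cast; ring]
      exact ih (j + 1) hlt' (by omega) (by omega)
    · rw [if_neg hz]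
      have hmem : digitOf j ∈ s := by
        by_contra hm
        exact hz (List.count_eq_zero_of_not_mem hm)
      have : Nat.find hex = j := (Nat.find_eq_iff hex).mpr ⟨hmem, fun n hn => hlt n hn⟩
      omega

-- B returns the least digit value present in s
lemma fr_alt_eq (x : Int) (hex : ∃ j, digitOf j ∈ PySem.Int.toChars x) :
    fr_alt x = (Nat.find hex : Int) := by
  set s := PySem.Int.toChars x with hs
  have hN9 : Nat.find hex ≤ 9 := by
    obtain ⟨c, hc, hd⟩ := toChars_has_digit x
    obtain ⟨hceq, hv9, _⟩ := isdigit_elim hd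
    have : digitOf (c.toNat - 48) ∈ s := hceq ▸ hc
    exact le_trans (Nat.find_min' hex this) hv9
  have hNmem : digitOf (Nat.find hex) ∈ s := Nat.find_spec hex
  have hNval : (Nat.find hex : Int) ∈
      (s.filter PySem.Chars.isdigit).map (fun c => (c.toNat : Int) - 48) := by
    refine List.mem_map.mpr ⟨digitOf (Nat.find hex), ?_, ?_⟩
    · exact List.mem_filter.mpr ⟨hNmem, isdigit_digitOf _ hN9⟩
    · rw [digitOf_toNat _ hN9]; push_cast; ring
  unfold fr_alt
  simp only [← hs]
  rcases hvals : (s.filter PySem.Chars.isdigit).map (fun c => (c.toNat : Int) - 48) with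
    _ | ⟨h, t⟩
  · rw [hvals] at hNval; simp at hNval
  · rw [hvals]
    show t.foldl min h = (Nat.find hex : Int)
    have hsub : ∀ v ∈ h :: t, (Nat.find hex : Int) ≤ v := by
      intro v hv
      rw [← hvals] at hv
      obtain ⟨c, hc, hval⟩ := List.mem_map.mp hv
      obtain ⟨hcmem, hcd⟩ := List.mem_filter.mp hc
      obtain ⟨hceq, hv9, h48⟩ := isdigit_elim hcd
      have hmem' : digitOf (c.toNat - 48) ∈ s := hceq ▸ hcmem
      have := Nat.find_min' hex hmem'
      have : (Nat.find hex : Int) ≤ ((c.toNat - 48 : Nat) : Int) := by exact_mod_cast this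
      rw [← hval]
      push_cast [h48] at this ⊢
      omega
    have hmin_mem : t.foldl min h ∈ h :: t := by
      rcases PySem.List.foldl_min_mem t h with he | he
      · rw [he]; exact List.mem_cons_self
      · exact List.mem_cons_of_mem _ he
    have hle1 : (Nat.find hex : Int) ≤ t.foldl min h := hsub _ hmin_mem
    have hle2 : t.foldl min h ≤ (Nat.find hex : Int) := by
      rw [hvals] at hNval
      rcases List.mem_cons.mp hNval with he | he
      · exact he ▸ (PySem.List.foldl_min_le t h).1
      · exact (PySem.List.foldl_min_le t h).2 _ he
    omega

-- ===== VERDICT (by name: the statement is the Claim_ definition above) =====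
theorem fr_spec : Claim_equal_fr := by
  intro x _
  unfold Spec_fr
  have hex : ∃ j, digitOf j ∈ PySem.Int.toChars x := by
    obtain ⟨c, hc, hd⟩ := toChars_has_digit x
    obtain ⟨hceq, _, _⟩ := isdigit_elim hd
    exact ⟨c.toNat - 48, hceq ▸ hc⟩
  have hN9 : Nat.find hex ≤ 9 := by
    obtain ⟨c, hc, hd⟩ := toChars_has_digit x
    obtain ⟨hceq, hv9, _⟩ := isdigit_elim hd
    exact le_trans (Nat.find_min' hex (hceq ▸ hc)) hv9
  rw [fr_alt_eq x hex]
  show frWhile _ ((0 : Nat) : Int) _ ((0 : Nat) : Int) 10 = _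
  exact frWhile_eq (PySem.Int.toChars x) hex 10 0 (by omega) (by omega) (by omega)
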